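-- pv_equiv track=rewrite | github.com/bartekpacia/matura | matury/2019/1.py | firstEven
-- ===== SOURCE A (Python) =====
-- def firstEven(arr):
--   """
--   Rozwiązanie z odpowiedzi.
--   """
--   left = 0
--   right = len(arr) - 1
--
--   while left < right:
--     mid = (left + right) // 2
--     if arr[mid] % 2 != 0:  # parzysta
--       left = mid + 1
--     else:
--       right = mid
--
--   return arr[left]
-- ===== SOURCE B (Python) =====
-- def firstEven(arr):
--     # Recursive divide-and-conquer on sublists instead of an index-pair loop.
--     if len(arr) <= 1:
--         return arr[0]
--     m = (len(arr) - 1) // 2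
--     if arr[m] % 2 != 0:
--         return firstEven(arr[m + 1:])
--     else:
--         return firstEven(arr[:m + 1])
-- ===== Notes on version B (the rewrite author's own statement) =====
-- stated objective: alternative
-- what changed: Replaced the iterative two-index (left/right) while-loop binary search with a recursive divide-and-conquer that recurses on sublists (arr[m+1:] or arr[:m+1]) with no index bookkeeping.
import Mathlib
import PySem

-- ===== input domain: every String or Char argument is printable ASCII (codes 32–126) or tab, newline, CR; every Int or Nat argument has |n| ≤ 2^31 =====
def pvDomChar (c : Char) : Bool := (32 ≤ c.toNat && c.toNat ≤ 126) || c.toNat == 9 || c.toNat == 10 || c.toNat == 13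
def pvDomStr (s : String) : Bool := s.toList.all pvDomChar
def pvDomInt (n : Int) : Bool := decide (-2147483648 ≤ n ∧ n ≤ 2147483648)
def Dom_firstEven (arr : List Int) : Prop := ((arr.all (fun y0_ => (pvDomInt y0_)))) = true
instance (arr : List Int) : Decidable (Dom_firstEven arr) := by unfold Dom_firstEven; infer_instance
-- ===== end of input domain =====

-- B is an alternative decomposition (recursion on sublists instead of an index-pair loop); same cost class.

-- ===== PORT A =====
-- The while-loop over (left, right); arr[·] is PySem.List.pyGetD (always in range under Pre_).
def firstEvenGo (arr : List Int) (left right : Int) : Int :=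
  if _h : left < right then
    let mid := PySem.Int.floordiv (left + right) 2
    if PySem.Int.mod (PySem.List.pyGetD arr mid 0) 2 ≠ 0 then
      firstEvenGo arr (mid + 1) right
    else
      firstEvenGo arr left mid
  else
    PySem.List.pyGetD arr left 0
termination_by (right - left).toNat
decreasing_by
  · have h2 : PySem.Int.floordiv (left + right) 2 = (left + right) / 2 :=
      PySem.Int.floordiv_eq_ediv_of_pos (by omega)
    omega
  · have h2 : PySem.Int.floordiv (left + right) 2 = (left + right) / 2 :=
      PySem.Int.floordiv_eq_ediv_of_pos (by omega)
    omega

def firstEven (arr : List Int) : Int :=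
  firstEvenGo arr 0 ((arr.length : Int) - 1)

-- ===== PORT B =====
-- Recursive divide-and-conquer on sublists: arr[m+1:] / arr[:m+1] via PySem.List.slice.
def firstEvenSub (xs : List Int) : Int :=
  if _h : xs.length ≤ 1 then
    PySem.List.pyGetD xs 0 0
  else
    let m := PySem.Int.floordiv ((xs.length : Int) - 1) 2
    if PySem.Int.mod (PySem.List.pyGetD xs m 0) 2 ≠ 0 then
      firstEvenSub (PySem.List.slice xs (some (m + 1)) none)
    else
      firstEvenSub (PySem.List.slice xs none (some (m + 1)))
termination_by xs.length
decreasing_by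
  · have h2 : PySem.Int.floordiv ((xs.length : Int) - 1) 2 = ((xs.length : Int) - 1) / 2 :=
      PySem.Int.floordiv_eq_ediv_of_pos (by omega)
    rw [PySem.List.slice_from xs (by omega)]
    simp only [List.length_drop]
    omega
  · have h2 : PySem.Int.floordiv ((xs.length : Int) - 1) 2 = ((xs.length : Int) - 1) / 2 :=
      PySem.Int.floordiv_eq_ediv_of_pos (by omega)
    rw [PySem.List.slice_to xs (by omega)]
    simp only [List.length_take]
    omega

def firstEven_alt (arr : List Int) : Int :=
  firstEvenSub arr

-- ===== PRECONDITION & SPEC =====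
-- Pre_ excludes only the empty list, on which A raises IndexError (arr[0] with left = 0).
def Pre_firstEven (arr : List Int) : Prop := arr ≠ []
instance (arr : List Int) : Decidable (Pre_firstEven arr) := by unfold Pre_firstEven; infer_instance
def pvWitness_firstEven : List Int := ([1, 3, 4, 6])

def Spec_firstEven (arr : List Int) (out : Int) : Prop := out = firstEven_alt arr
instance (arr : List Int) (out : Int) : Decidable (Spec_firstEven arr out) := by unfold Spec_firstEven; infer_instance

-- ===== CLAIM (what is proved, stated in full; the proofs are below) =====
def Claim_equal_firstEven : Prop := ∀ (arr : List Int), Dom_firstEven arr → Pre_firstEven arr → Spec_firstEven arr (firstEven arr)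

-- ===== LEMMAS AND PROOFS =====

-- Main bridge: the loop on index window [l, r] equals the sublist recursion on arr[l : r+1].
theorem firstEvenGo_eq_sub (arr : List Int) (l r : Int)
    (hl : 0 ≤ l) (hlr : l ≤ r) (hr : r < (arr.length : Int)) :
    firstEvenGo arr l r = firstEvenSub (PySem.List.slice arr (some l) (some (r + 1))) := by
  have hs : PySem.List.slice arr (some l) (some (r + 1))
      = (arr.drop l.toNat).take ((r + 1).toNat - l.toNat) :=
    PySem.List.slice_toNat arr (by omega) (by omega)
  have hlen : (PySem.List.slice arr (some l) (some (r + 1))).length = (r + 1 - l).toNat := by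
    rw [hs]; simp only [List.length_take, List.length_drop]; omega
  by_cases h : l < r
  · -- one loop step on each side
    rw [firstEvenGo, firstEvenSub]
    rw [dif_pos h, dif_neg (by omega)]
    have hmid : PySem.Int.floordiv (l + r) 2 = (l + r) / 2 :=
      PySem.Int.floordiv_eq_ediv_of_pos (by omega)
    have hm : PySem.Int.floordiv ((((PySem.List.slice arr (some l) (some (r + 1))).length : Int)) - 1) 2
        = ((r - l) / 2 : Int) := by
      rw [PySem.Int.floordiv_eq_ediv_of_pos (by omega)]
      rw [hlen]; omega
    -- the probed elements coincide
    have helem : PySem.List.pyGetD (PySem.List.slice arr (some l) (some (r + 1))) ((r - l) / 2) 0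
        = PySem.List.pyGetD arr ((l + r) / 2) 0 := by
      rw [PySem.List.pyGetD_eq_getElem _ _ (by omega) (by rw [hlen]; omega)]
      rw [PySem.List.pyGetD_eq_getElem _ _ (by omega) (by omega)]
      simp only [hs, List.getElem_take, List.getElem_drop]
      congr 1
      omega
    simp only [hmid, hm, helem]
    by_cases hpar : PySem.Int.mod (PySem.List.pyGetD arr ((l + r) / 2) 0) 2 ≠ 0
    · rw [if_pos hpar, if_pos hpar]
      rw [firstEvenGo_eq_sub arr ((l + r) / 2 + 1) r (by omega) (by omega) hr]
      congr 1
      rw [PySem.List.slice_from _ (by omega), hs,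
        PySem.List.slice_toNat arr (a := (l + r) / 2 + 1) (b := r + 1) (by omega) (by omega),
        List.drop_take, List.drop_drop]
      have e1 : ((r + 1).toNat - l.toNat) - ((r - l) / 2 + 1).toNat
          = (r + 1).toNat - ((l + r) / 2 + 1).toNat := by omega
      have e2 : l.toNat + ((r - l) / 2 + 1).toNat = ((l + r) / 2 + 1).toNat := by omega
      rw [e1, e2]
    · rw [if_neg hpar, if_neg hpar]
      rw [firstEvenGo_eq_sub arr l ((l + r) / 2) (by omega) (by omega) (by omega)]
      congr 1
      rw [PySem.List.slice_to _ (by omega), hs,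
        PySem.List.slice_toNat arr (a := l) (b := (l + r) / 2 + 1) (by omega) (by omega),
        List.take_take]
      congr 1
      all_goals omega
  · -- l = r: both return the single element of the window
    rw [firstEvenGo, firstEvenSub]
    rw [dif_neg (by omega), dif_pos (by rw [hlen]; omega)]
    rw [PySem.List.pyGetD_eq_getElem _ _ hl (by omega)]
    rw [PySem.List.pyGetD_eq_getElem _ _ (by omega) (by rw [hlen]; omega)]
    simp only [hs, List.getElem_take, List.getElem_drop]
    congr 1
termination_by (r - l).toNat
decreasing_by
  · omega
  · omega

theorem firstEven_spec : Claim_equal_firstEven := by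
  intro arr _hdom hpre
  have hne : 1 ≤ (arr.length : Int) := by
    cases arr with
    | nil => exact absurd rfl hpre
    | cons a t => simp
  unfold Spec_firstEven firstEven firstEven_alt
  rw [firstEvenGo_eq_sub arr 0 ((arr.length : Int) - 1) (by omega) (by omega) (by omega)]
  congr 1
  rw [show ((arr.length : Int) - 1 + 1) = (arr.length : Int) by ring]
  rw [PySem.List.slice_toNat arr (by omega) (by omega)]
  simp
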